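-- pv_equiv track=rewrite | github.com/HelenDun/google_foobar | bomb.py | foo
-- ===== SOURCE A (Python) =====
-- def foo(n):
--     pairs_old = set()
--     pairs_old.add((1,1))
--     pairs_new = set()
--     result = 0
--     while (result < n):
--         result += 1
--         for pair_old in pairs_old:
--             pair_new1 = (pair_old[0] + pair_old[1], pair_old[1])
--             pair_new2 = (pair_old[0], pair_old[1] + pair_old[0])
--             pairs_new.add(pair_new1)
--             pairs_new.add(pair_new2)
--         pairs_old = pairs_new
--         pairs_new = set()
--     return pairs_old
-- ===== SOURCE B (Python) =====
-- def foo(n):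
--     def frontier(k):
--         if k <= 0:
--             return {(1, 1)}
--         return {c for a, b in frontier(k - 1) for c in ((a + b, b), (a, b + a))}
--     return frontier(n)
-- ===== Notes on version B (the rewrite author's own statement) =====
-- stated objective: simpler
-- what changed: Replaces the while-loop maintaining two mutable frontier sets (pairs_old/pairs_new with explicit adds and reassignment) by a short recursive frontier(k) whose step is a single set comprehension.
import Mathlib
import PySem

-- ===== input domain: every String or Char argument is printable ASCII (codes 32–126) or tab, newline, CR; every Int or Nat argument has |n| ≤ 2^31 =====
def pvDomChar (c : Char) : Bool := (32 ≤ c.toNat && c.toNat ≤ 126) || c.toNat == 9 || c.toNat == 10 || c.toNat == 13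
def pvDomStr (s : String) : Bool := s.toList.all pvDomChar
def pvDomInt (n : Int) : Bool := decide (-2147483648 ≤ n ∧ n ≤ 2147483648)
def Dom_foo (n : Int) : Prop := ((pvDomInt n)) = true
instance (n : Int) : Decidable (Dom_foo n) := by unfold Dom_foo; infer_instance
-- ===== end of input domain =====

-- B replaces A's while-loop over two mutable frontier sets by a recursive frontier(k)
-- built with a set comprehension (objective: simpler, same exponential cost).

-- ===== PORT A =====
-- one pass of A's inner 'for pair_old in pairs_old' loop, building pairs_new
def fooStep (old : PySem.Set (Int × Int)) : PySem.Set (Int × Int) :=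
  old.foldl
    (fun ns p => PySem.Set.add (PySem.Set.add ns (p.1 + p.2, p.2)) (p.1, p.2 + p.1))
    PySem.Set.empty

-- A's 'while result < n' loop: runs n.toNat times (result counts 0,1,…)
def fooLoop (fuel : Nat) (old : PySem.Set (Int × Int)) : PySem.Set (Int × Int) :=
  match fuel with
  | 0 => old
  | f + 1 => fooLoop f (fooStep old)

def foo (n : Int) : List (Int × Int) :=
  fooLoop n.toNat (PySem.Set.add PySem.Set.empty (1, 1))

-- ===== PORT B =====
-- B's recursive 'frontier(k)': the set comprehension is Set.ofList of the flatMap of children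
def fooFrontier (k : Int) : PySem.Set (Int × Int) :=
  if k ≤ 0 then PySem.Set.ofList [(1, 1)]
  else PySem.Set.ofList
    ((fooFrontier (k - 1)).flatMap (fun p => [(p.1 + p.2, p.2), (p.1, p.2 + p.1)]))
termination_by k.toNat
decreasing_by omega

def foo_alt (n : Int) : List (Int × Int) :=
  fooFrontier n

-- ===== PRECONDITION & SPEC =====
def Spec_foo (n : Int) (out : List (Int × Int)) : Prop := out = foo_alt n
instance (n : Int) (out : List (Int × Int)) : Decidable (Spec_foo n out) := by unfold Spec_foo; infer_instance

-- ===== CLAIM (what is proved, stated in full; the proofs are below) =====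
def Claim_equal_foo : Prop := ∀ (n : Int), Dom_foo n → Spec_foo n (foo n)

-- ===== LEMMAS AND PROOFS =====

-- the two children of a pair, in the order both programs produce them
def pvChildren (p : Int × Int) : List (Int × Int) :=
  [(p.1 + p.2, p.2), (p.1, p.2 + p.1)]

-- the depth-first leaf list of the move tree
def pvDfs (a b : Int) : Nat → List (Int × Int)
  | 0 => [(a, b)]
  | k + 1 => pvDfs (a + b) b k ++ pvDfs a (b + a) k

-- the reverse move: recovers the parent of any child pair
def pvR (p : Int × Int) : Int × Int :=
  if p.2 < p.1 then (p.1 - p.2, p.2) else (p.1, p.2 - p.1)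

lemma pvDfs_trace : ∀ (k : Nat) (a b : Int), 1 ≤ a → 1 ≤ b →
    ∀ p ∈ pvDfs a b k, pvR^[k] p = (a, b) := by
  intro k
  induction k with
  | zero => intro a b _ _ p hp; simp [pvDfs] at hp; simp [hp]
  | succ k ih =>
    intro a b ha hb p hp
    rw [Function.iterate_succ']
    simp only [pvDfs, List.mem_append] at hp
    rcases hp with hp | hp
    · have := ih (a + b) b (by omega) hb p hp
      simp [this, pvR, show b < a + b by omega]
    · have := ih a (b + a) ha (by omega) p hp
      simp [this, pvR, show ¬ (b + a < a) by omega]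

lemma pvDfs_nodup : ∀ (k : Nat) (a b : Int), 1 ≤ a → 1 ≤ b → (pvDfs a b k).Nodup := by
  intro k
  induction k with
  | zero => intro a b _ _; simp [pvDfs]
  | succ k ih =>
    intro a b ha hb
    rw [pvDfs, List.nodup_append]
    refine ⟨ih _ _ (by omega) hb, ih _ _ ha (by omega), ?_⟩
    intro p hp q hq heq
    have h1 := pvDfs_trace k (a + b) b (by omega) hb p hp
    have h2 := pvDfs_trace k a (b + a) ha (by omega) q hq
    rw [heq, h2] at h1
    have : a = a + b := congrArg Prod.fst h1
    omega

lemma pvDfs_flatMap (k : Nat) (a b : Int) :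
    (pvDfs a b k).flatMap pvChildren = pvDfs a b (k + 1) := by
  induction k generalizing a b with
  | zero => simp [pvDfs, pvChildren]
  | succ k ih => simp only [pvDfs, List.flatMap_append, ih]

lemma pvSet_add_of_not_mem {p : Int × Int} {s : PySem.Set (Int × Int)} (h : p ∉ s) :
    PySem.Set.add s p = s ++ [p] := by
  simp [PySem.Set.add, PySem.Set.contains, h]

-- A's inner loop appends the children of each frontier element, provided no duplicates arise
lemma fooStep_foldl (l : List (Int × Int)) :
    ∀ (acc : PySem.Set (Int × Int)), (acc ++ l.flatMap pvChildren).Nodup →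
      l.foldl
        (fun ns p => PySem.Set.add (PySem.Set.add ns (p.1 + p.2, p.2)) (p.1, p.2 + p.1))
        acc = acc ++ l.flatMap pvChildren := by
  induction l with
  | nil => intro acc _; simp
  | cons p l ih =>
    intro acc hnd
    have hflat : (p :: l).flatMap pvChildren
        = (p.1 + p.2, p.2) :: (p.1, p.2 + p.1) :: l.flatMap pvChildren := by
      simp [pvChildren]
    rw [hflat] at hnd
    have h1 : (p.1 + p.2, p.2) ∉ acc := by
      intro h
      exact (List.disjoint_of_nodup_append hnd) h (by simp)
    have hcons : ((p.1 + p.2, p.2) :: (p.1, p.2 + p.1) :: l.flatMap pvChildren).Nodup := by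
      rcases List.nodup_append.mp hnd with ⟨-, h, -⟩; exact h
    have h2 : (p.1, p.2 + p.1) ∉ acc ++ [(p.1 + p.2, p.2)] := by
      intro h
      rcases List.mem_append.mp h with h | h
      · exact (List.disjoint_of_nodup_append hnd) h (by simp)
      · have := (List.nodup_cons.mp hcons).1
        simp at h
        exact this (by simp [h])
    rw [List.foldl_cons, pvSet_add_of_not_mem h1, pvSet_add_of_not_mem h2]
    have := ih (acc ++ [(p.1 + p.2, p.2)] ++ [(p.1, p.2 + p.1)]) (by
      simpa [List.append_assoc] using hnd)
    rw [this, hflat]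
    simp

lemma fooStep_eq (s : PySem.Set (Int × Int)) (h : (s.flatMap pvChildren).Nodup) :
    fooStep s = s.flatMap pvChildren := by
  have := fooStep_foldl s PySem.Set.empty (by simpa [PySem.Set.empty] using h)
  simpa [fooStep, PySem.Set.empty] using this

lemma pvDfs_one_one_nodup (k : Nat) : (pvDfs 1 1 k).Nodup :=
  pvDfs_nodup k 1 1 (by omega) (by omega)

lemma fooLoop_dfs : ∀ (k j : Nat), fooLoop k (pvDfs 1 1 j) = pvDfs 1 1 (j + k) := by
  intro k
  induction k with
  | zero => intro j; simp [fooLoop]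
  | succ k ih =>
    intro j
    rw [fooLoop, fooStep_eq _ (by rw [pvDfs_flatMap]; exact pvDfs_one_one_nodup (j + 1)),
        pvDfs_flatMap, ih (j + 1)]
    congr 1
    omega

lemma pvSet_ofList_of_nodup : ∀ (l : List (Int × Int)) (acc : PySem.Set (Int × Int)),
    (acc ++ l).Nodup → l.foldl PySem.Set.add acc = acc ++ l := by
  intro l
  induction l with
  | nil => intro acc _; simp
  | cons x l ih =>
    intro acc hnd
    have hx : x ∉ acc := by
      intro h
      exact (List.disjoint_of_nodup_append hnd) h (by simp)
    rw [List.foldl_cons, pvSet_add_of_not_mem hx,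
        ih (acc ++ [x]) (by simpa [List.append_assoc] using hnd)]
    simp

lemma fooFrontier_eq : ∀ (k : Nat) (d : Int), d.toNat = k → fooFrontier d = pvDfs 1 1 k := by
  intro k
  induction k with
  | zero =>
    intro d hd
    rw [fooFrontier, if_pos (by omega : d ≤ 0)]
    decide
  | succ k ih =>
    intro d hd
    rw [fooFrontier, if_neg (by omega : ¬ d ≤ 0), ih (d - 1) (by omega)]
    have hch : (pvDfs 1 1 k).flatMap (fun p => [(p.1 + p.2, p.2), (p.1, p.2 + p.1)])
        = pvDfs 1 1 (k + 1) := by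
      rw [← pvDfs_flatMap]
      rfl
    rw [hch]
    have h0 := pvSet_ofList_of_nodup (pvDfs 1 1 (k + 1)) PySem.Set.empty
      (by simpa [PySem.Set.empty] using pvDfs_one_one_nodup (k + 1))
    rw [PySem.Set.ofList_eq_foldl]
    simpa [PySem.Set.empty] using h0

-- ===== VERDICT (by name: the statement is the Claim_ definition above) =====
theorem foo_spec : Claim_equal_foo := by
  intro n _
  unfold Spec_foo foo foo_alt
  have hinit : PySem.Set.add PySem.Set.empty ((1 : Int), (1 : Int)) = pvDfs 1 1 0 := by
    decide
  rw [hinit, fooLoop_dfs n.toNat 0, fooFrontier_eq n.toNat n rfl, Nat.zero_add]
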